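-- pv_equiv track=rewrite | github.com/barelyaninconvenience/sok | generate-ascii-art_1.py | combine_letters
-- ===== SOURCE A (Python) =====
-- def combine_letters(text, letters, torus_lines=None, torus_pos=None):
--     """Combine individual letter arrays into full text"""
--     words = text.split()
--     result_lines = [''] * 6  # 6 lines tall
--
--     for word_idx, word in enumerate(words):
--         # Add spacing between words
--         if word_idx > 0:
--             for i in range(6):
--                 result_lines[i] += '    '
--
--         for char_idx, char in enumerate(word):
--             char_upper = char.upper()
--
--             # Use torus for 'O' in 'of' if provided
--             if torus_lines and torus_pos == (word_idx, char_idx):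
--                 for i in range(min(6, len(torus_lines))):
--                     if i < len(torus_lines):
--                         result_lines[i] += torus_lines[i] + ' '
--                     else:
--                         result_lines[i] += ' ' * (len(torus_lines[0]) + 1)
--             elif char_upper in letters:
--                 for i in range(6):
--                     result_lines[i] += letters[char_upper][i] + ' '
--             else:
--                 # Unknown character - use spaces
--                 for i in range(6):
--                     result_lines[i] += ' ' * 10
--
--     return result_lines
-- ===== SOURCE B (Python) =====
-- def combine_letters(text, letters, torus_lines=None, torus_pos=None):
--     """Combine individual letter arrays into full text"""
--     words = text.split()
--
--     def row(i):
--         # build output row i alone, in one left-to-right scan over the words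
--         parts = []
--         for wi, word in enumerate(words):
--             if wi > 0:
--                 parts.append('    ')
--             for ci, ch in enumerate(word):
--                 cu = ch.upper()
--                 if torus_lines and torus_pos == (wi, ci):
--                     if i < len(torus_lines):
--                         parts.append(torus_lines[i] + ' ')
--                 elif cu in letters:
--                     parts.append(letters[cu][i] + ' ')
--                 else:
--                     parts.append(' ' * 10)
--         return ''.join(parts)
--
--     return [row(i) for i in range(6)]
-- ===== Notes on version B (the rewrite author's own statement) =====
-- stated objective: faster
-- what changed: B transposes the traversal: instead of A's single character scan that mutates six accumulator strings in place (quadratic string rebuilding), B computes each of the six output rows independently - outer loop over rows, inner scan over the text, collecting that row's parts and doing one ''.join per row - correct because each output row depends only on the row-i slice of every glyph.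
import Mathlib
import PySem

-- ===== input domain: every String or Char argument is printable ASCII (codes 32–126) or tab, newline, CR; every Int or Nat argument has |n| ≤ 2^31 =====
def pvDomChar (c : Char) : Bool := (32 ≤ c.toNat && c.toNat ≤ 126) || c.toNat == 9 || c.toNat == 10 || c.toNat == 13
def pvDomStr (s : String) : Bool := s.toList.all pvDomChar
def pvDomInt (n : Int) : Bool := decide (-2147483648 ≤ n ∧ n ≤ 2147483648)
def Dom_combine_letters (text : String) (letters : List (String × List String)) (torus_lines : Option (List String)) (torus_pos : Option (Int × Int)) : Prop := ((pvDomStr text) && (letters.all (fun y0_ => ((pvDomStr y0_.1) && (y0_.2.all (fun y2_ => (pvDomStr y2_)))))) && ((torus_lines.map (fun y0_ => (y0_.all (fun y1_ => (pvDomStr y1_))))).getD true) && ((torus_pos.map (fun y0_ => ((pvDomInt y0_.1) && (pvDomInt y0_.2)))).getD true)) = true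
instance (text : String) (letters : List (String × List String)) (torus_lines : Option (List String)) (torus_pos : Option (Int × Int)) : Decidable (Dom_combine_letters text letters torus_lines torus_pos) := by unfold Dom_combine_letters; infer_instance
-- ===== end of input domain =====

-- B transposes the traversal: it computes each of the six output rows independently (outer loop over
-- rows, inner scan over the text) instead of A's single character scan mutating six accumulators.

-- shared small predicate: Python's `torus_lines and torus_pos == (word_idx, char_idx)`
def pvTorusHit (torus_lines : Option (List String)) (torus_pos : Option (Int × Int)) (wi ci : Int) : Bool :=
  (torus_lines.elim false fun tl => !tl.isEmpty) && torus_pos == some (wi, ci)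

-- ===== PORT A =====
-- result_lines[i] += s  (i is always 0..5 and the list always has length 6, so the total forms are exact)
def pvRowApp (rl : List String) (i : Int) (s : String) : List String :=
  PySem.List.pySetD rl i (PySem.List.pyGetD rl i "" ++ s)

-- the body of A's `for char_idx, char in enumerate(word)` loop
def pvAChar (letters : List (String × List String)) (torus_lines : Option (List String))
    (torus_pos : Option (Int × Int)) (word_idx : Int) (rl : List String) (cp : Int × Char) :
    List String :=
  let char_upper := String.ofList [PySem.Chars.upperChar cp.2]
  if pvTorusHit torus_lines torus_pos word_idx cp.1 then
    let tl := torus_lines.getD []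
    (PySem.List.pyRange 0 (min 6 (tl.length : Int)) 1).foldl
      (fun rl i =>
        if i < (tl.length : Int) then
          pvRowApp rl i (PySem.List.pyGetD tl i "" ++ " ")
        else  -- dead in Python too: i < min(6, len(tl)) ≤ len(tl); ' ' * (len(tl[0]) + 1)
          pvRowApp rl i (String.ofList (List.replicate ((PySem.Str.len (PySem.List.pyGetD tl 0 "") + 1).toNat) ' ')))
      rl
  else
    -- char_upper in letters / letters[char_upper][i]; pyGetD's default is dead under Pre_
    match PySem.Dict.get? (PySem.Dict.mk letters) char_upper with
    | some glyph =>
        (PySem.List.pyRange 0 6 1).foldl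
          (fun rl i => pvRowApp rl i (PySem.List.pyGetD glyph i "" ++ " ")) rl
    | none =>
        (PySem.List.pyRange 0 6 1).foldl (fun rl i => pvRowApp rl i "          ") rl

-- the body of A's `for word_idx, word in enumerate(words)` loop
def pvAWord (letters : List (String × List String)) (torus_lines : Option (List String))
    (torus_pos : Option (Int × Int)) (rl : List String) (wp : Int × String) : List String :=
  let rl := if wp.1 > 0 then
      (PySem.List.pyRange 0 6 1).foldl (fun rl i => pvRowApp rl i "    ") rl
    else rl
  (PySem.List.enumerate wp.2.toList 0).foldl (pvAChar letters torus_lines torus_pos wp.1) rl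

def combine_letters (text : String) (letters : List (String × List String))
    (torus_lines : Option (List String)) (torus_pos : Option (Int × Int)) : List String :=
  (PySem.List.enumerate (PySem.Str.split₀ text) 0).foldl
    (pvAWord letters torus_lines torus_pos) (List.replicate 6 "")

-- ===== PORT B =====
-- B's inner char loop, for a fixed output row i: append row i's part (nothing for a torus row ≥ len)
def pvBChar (letters : List (String × List String)) (torus_lines : Option (List String))
    (torus_pos : Option (Int × Int)) (wi i : Int) (ps : List String) (cp : Int × Char) :
    List String :=
  let cu := String.ofList [PySem.Chars.upperChar cp.2]
  if pvTorusHit torus_lines torus_pos wi cp.1 then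
    let tl := torus_lines.getD []
    if i < (tl.length : Int) then ps ++ [PySem.List.pyGetD tl i "" ++ " "] else ps
  else
    match PySem.Dict.get? (PySem.Dict.mk letters) cu with
    | some glyph => ps ++ [PySem.List.pyGetD glyph i "" ++ " "]
    | none => ps ++ ["          "]

-- B's word loop for a fixed row i: gap part between words, then one part per character
def pvBWordRow (letters : List (String × List String)) (torus_lines : Option (List String))
    (torus_pos : Option (Int × Int)) (i : Int) (ps : List String) (wp : Int × String) :
    List String :=
  (PySem.List.enumerate wp.2.toList 0).foldl (pvBChar letters torus_lines torus_pos wp.1 i)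
    (if wp.1 > 0 then ps ++ ["    "] else ps)

def combine_letters_alt (text : String) (letters : List (String × List String))
    (torus_lines : Option (List String)) (torus_pos : Option (Int × Int)) : List String :=
  let words := PySem.List.enumerate (PySem.Str.split₀ text) 0
  (PySem.List.pyRange 0 6 1).map
    (fun i => PySem.Str.join "" (words.foldl (pvBWordRow letters torus_lines torus_pos i) []))

-- ===== PRECONDITION & SPEC =====
-- Pre_ excludes exactly the inputs where Python A raises IndexError: some character of the text
-- (outside the torus position) is looked up in `letters` and its glyph has fewer than 6 rows.
def Pre_combine_letters (text : String) (letters : List (String × List String)) (torus_lines : Option (List String)) (torus_pos : Option (Int × Int)) : Prop :=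
  ((PySem.List.enumerate (PySem.Str.split₀ text) 0).all (fun wp =>
    (PySem.List.enumerate wp.2.toList 0).all (fun cp =>
      pvTorusHit torus_lines torus_pos wp.1 cp.1 ||
      (match PySem.Dict.get? (PySem.Dict.mk letters) (String.ofList [PySem.Chars.upperChar cp.2]) with
       | some glyph => decide (6 ≤ glyph.length)
       | none => true)))) = true
instance (text : String) (letters : List (String × List String)) (torus_lines : Option (List String)) (torus_pos : Option (Int × Int)) : Decidable (Pre_combine_letters text letters torus_lines torus_pos) := by unfold Pre_combine_letters; infer_instance

def pvWitness_combine_letters : String × (List (String × List String)) × Option (List String) × (Option (Int × Int)) :=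
  ("ab a", [("A", ["a0", "a1", "a2", "a3", "a4", "a5"]), ("B", ["b0", "b1", "b2", "b3", "b4", "b5"])], some ["@@"], some (1, 0))

def Spec_combine_letters (text : String) (letters : List (String × List String)) (torus_lines : Option (List String)) (torus_pos : Option (Int × Int)) (out : List String) : Prop := out = combine_letters_alt text letters torus_lines torus_pos
instance (text : String) (letters : List (String × List String)) (torus_lines : Option (List String)) (torus_pos : Option (Int × Int)) (out : List String) : Decidable (Spec_combine_letters text letters torus_lines torus_pos out) := by unfold Spec_combine_letters; infer_instance

-- ===== CLAIM (what is proved, stated in full; the proofs are below) =====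
def Claim_equal_combine_letters : Prop := ∀ (text : String) (letters : List (String × List String)) (torus_lines : Option (List String)) (torus_pos : Option (Int × Int)), Dom_combine_letters text letters torus_lines torus_pos → Pre_combine_letters text letters torus_lines torus_pos → Spec_combine_letters text letters torus_lines torus_pos (combine_letters text letters torus_lines torus_pos)

-- ===== LEMMAS AND PROOFS =====

theorem pvWitness_ok :
    Dom_combine_letters (pvWitness_combine_letters.1) (pvWitness_combine_letters.2.1) (pvWitness_combine_letters.2.2.1) (pvWitness_combine_letters.2.2.2) ∧
    Pre_combine_letters (pvWitness_combine_letters.1) (pvWitness_combine_letters.2.1) (pvWitness_combine_letters.2.2.1) (pvWitness_combine_letters.2.2.2) := by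
  constructor <;> decide

-- A's six rows, written as the joins of six per-row parts lists (the bridge to B's view)
def pvRenderF (p : Int → List String) : List String :=
  [PySem.Str.join "" (p 0), PySem.Str.join "" (p 1), PySem.Str.join "" (p 2),
   PySem.Str.join "" (p 3), PySem.Str.join "" (p 4), PySem.Str.join "" (p 5)]

theorem pvRange6 : PySem.List.pyRange 0 6 1 = [0, 1, 2, 3, 4, 5] := by decide

theorem inter_nil (l : List (List Char)) : List.intercalate ([] : List Char) l = l.flatten := by
  induction l with
  | nil => rfl
  | cons a t ih =>
    cases t with
    | nil => simp [List.intercalate]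
    | cons b u => simp_all [List.intercalate, List.intersperse]

theorem join_snoc (xs : List String) (x : String) :
    PySem.Str.join "" (xs ++ [x]) = PySem.Str.join "" xs ++ x := by
  simp only [PySem.Str.join, PySem.Chars.join, List.map_append, List.map_cons, List.map_nil,
    show ("" : String).toList = [] from rfl]
  rw [inter_nil, inter_nil]
  simp [String.ofList_append]

theorem join_snoc_if (c : Prop) [Decidable c] (ps : List String) (x : String) :
    PySem.Str.join "" (if c then ps ++ [x] else ps)
      = PySem.Str.join "" ps ++ (if c then x else "") := by
  split_ifs
  · exact join_snoc ps x
  · simp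

-- A's `for i in range(6): result_lines[i] += g i` on a 6-row state, in closed form
theorem pvStep6 (g : Int → String) (a b c d e f : String) :
    (PySem.List.pyRange 0 6 1).foldl (fun rl i => pvRowApp rl i (g i)) [a, b, c, d, e, f]
      = [a ++ g 0, b ++ g 1, c ++ g 2, d ++ g 3, e ++ g 4, f ++ g 5] := by
  rw [pvRange6]
  simp [pvRowApp, List.foldl, PySem.List.pySetD, PySem.List.pySet?, PySem.List.pyGetD,
    PySem.List.pyIdx?]

-- A's torus loop (`for i in range(min(6, len(tl)))`) on a 6-row state, in closed form
theorem pvTorus6 (tl : List String) (dead : String) (a b c d e f : String) :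
    (PySem.List.pyRange 0 (min 6 (tl.length : Int)) 1).foldl
      (fun rl i =>
        if i < (tl.length : Int) then
          pvRowApp rl i (PySem.List.pyGetD tl i "" ++ " ")
        else pvRowApp rl i dead) [a, b, c, d, e, f]
    = [a ++ (if (0:Int) < (tl.length : Int) then PySem.List.pyGetD tl 0 "" ++ " " else ""),
       b ++ (if (1:Int) < (tl.length : Int) then PySem.List.pyGetD tl 1 "" ++ " " else ""),
       c ++ (if (2:Int) < (tl.length : Int) then PySem.List.pyGetD tl 2 "" ++ " " else ""),
       d ++ (if (3:Int) < (tl.length : Int) then PySem.List.pyGetD tl 3 "" ++ " " else ""),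
       e ++ (if (4:Int) < (tl.length : Int) then PySem.List.pyGetD tl 4 "" ++ " " else ""),
       f ++ (if (5:Int) < (tl.length : Int) then PySem.List.pyGetD tl 5 "" ++ " " else "")] := by
  match tl with
  | [] => simp [PySem.List.pyRange]
  | [x0] => simp [pvRowApp, show PySem.List.pyRange 0 1 1 = [0] from by decide,
      PySem.List.pySetD, PySem.List.pySet?, PySem.List.pyGetD, PySem.List.pyIdx?]
  | [x0,x1] => simp [pvRowApp, show PySem.List.pyRange 0 2 1 = [0,1] from by decide,
      PySem.List.pySetD, PySem.List.pySet?, PySem.List.pyGetD, PySem.List.pyIdx?]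
  | [x0,x1,x2] => simp [pvRowApp, show PySem.List.pyRange 0 3 1 = [0,1,2] from by decide,
      PySem.List.pySetD, PySem.List.pySet?, PySem.List.pyGetD, PySem.List.pyIdx?]
  | [x0,x1,x2,x3] => simp [pvRowApp, show PySem.List.pyRange 0 4 1 = [0,1,2,3] from by decide,
      PySem.List.pySetD, PySem.List.pySet?, PySem.List.pyGetD, PySem.List.pyIdx?]
  | [x0,x1,x2,x3,x4] => simp [pvRowApp, show PySem.List.pyRange 0 5 1 = [0,1,2,3,4] from by decide,
      PySem.List.pySetD, PySem.List.pySet?, PySem.List.pyGetD, PySem.List.pyIdx?]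
  | x0::x1::x2::x3::x4::x5::rest =>
    have h6 : min (6:Int) (((x0::x1::x2::x3::x4::x5::rest).length : Nat) : Int) = 6 := by
      simp; omega
    have hk : ∀ k : Int, k ≤ 5 → (k < (((x0::x1::x2::x3::x4::x5::rest).length : Nat) : Int)) = True := by
      intro k hk; simp only [eq_iff_iff, iff_true]; simp; omega
    rw [h6, pvRange6]
    simp only [List.foldl, pvRowApp]
    simp only [hk 0 (by omega), hk 1 (by omega), hk 2 (by omega), hk 3 (by omega),
      hk 4 (by omega), hk 5 (by omega), if_true]
    simp [PySem.List.pySetD, PySem.List.pySet?, PySem.List.pyGetD, PySem.List.pyIdx?]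

-- one character: A's update of the six rows is, row by row, B's appended part
theorem pvChar_step (letters : List (String × List String)) (torus_lines : Option (List String))
    (torus_pos : Option (Int × Int)) (wi : Int) (p : Int → List String) (cp : Int × Char) :
    pvAChar letters torus_lines torus_pos wi (pvRenderF p) cp
      = pvRenderF (fun i => pvBChar letters torus_lines torus_pos wi i (p i) cp) := by
  unfold pvAChar pvBChar
  cases h : pvTorusHit torus_lines torus_pos wi cp.1 with
  | true =>
    simp only [if_true]
    rw [show pvRenderF p = [PySem.Str.join "" (p 0), PySem.Str.join "" (p 1), PySem.Str.join "" (p 2),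
      PySem.Str.join "" (p 3), PySem.Str.join "" (p 4), PySem.Str.join "" (p 5)] from rfl, pvTorus6]
    simp [pvRenderF, join_snoc_if]
  | false =>
    simp only [Bool.false_eq_true, if_false]
    cases hg : PySem.Dict.get? (PySem.Dict.mk letters) (String.ofList [PySem.Chars.upperChar cp.2]) with
    | some glyph =>
      dsimp only
      rw [show pvRenderF p = [PySem.Str.join "" (p 0), PySem.Str.join "" (p 1), PySem.Str.join "" (p 2),
        PySem.Str.join "" (p 3), PySem.Str.join "" (p 4), PySem.Str.join "" (p 5)] from rfl,
        pvStep6 (fun i => PySem.List.pyGetD glyph i "" ++ " ")]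
      simp [pvRenderF, join_snoc]
    | none =>
      dsimp only
      rw [show pvRenderF p = [PySem.Str.join "" (p 0), PySem.Str.join "" (p 1), PySem.Str.join "" (p 2),
        PySem.Str.join "" (p 3), PySem.Str.join "" (p 4), PySem.Str.join "" (p 5)] from rfl,
        pvStep6 (fun _ => "          ")]
      simp [pvRenderF, join_snoc]

theorem pvFoldChars (letters : List (String × List String)) (torus_lines : Option (List String))
    (torus_pos : Option (Int × Int)) (wi : Int) (l : List (Int × Char)) (p : Int → List String) :
    l.foldl (pvAChar letters torus_lines torus_pos wi) (pvRenderF p)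
      = pvRenderF (fun i => l.foldl (pvBChar letters torus_lines torus_pos wi i) (p i)) := by
  induction l generalizing p with
  | nil => rfl
  | cons c t ih =>
    simp only [List.foldl]
    rw [pvChar_step]
    exact ih _

theorem pvWord_step (letters : List (String × List String)) (torus_lines : Option (List String))
    (torus_pos : Option (Int × Int)) (p : Int → List String) (wp : Int × String) :
    pvAWord letters torus_lines torus_pos (pvRenderF p) wp
      = pvRenderF (fun i => pvBWordRow letters torus_lines torus_pos i (p i) wp) := by
  unfold pvAWord pvBWordRow
  by_cases h : wp.1 > 0
  · simp only [if_pos h]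
    have hgap : (PySem.List.pyRange 0 6 1).foldl (fun rl i => pvRowApp rl i "    ") (pvRenderF p)
        = pvRenderF (fun i => p i ++ ["    "]) := by
      rw [show pvRenderF p = [PySem.Str.join "" (p 0), PySem.Str.join "" (p 1), PySem.Str.join "" (p 2),
        PySem.Str.join "" (p 3), PySem.Str.join "" (p 4), PySem.Str.join "" (p 5)] from rfl,
        pvStep6 (fun _ => "    ")]
      simp [pvRenderF, join_snoc]
    rw [hgap, pvFoldChars]
  · simp only [if_neg h]
    rw [pvFoldChars]

theorem pvFoldWords (letters : List (String × List String)) (torus_lines : Option (List String))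
    (torus_pos : Option (Int × Int)) (l : List (Int × String)) (p : Int → List String) :
    l.foldl (pvAWord letters torus_lines torus_pos) (pvRenderF p)
      = pvRenderF (fun i => l.foldl (pvBWordRow letters torus_lines torus_pos i) (p i)) := by
  induction l generalizing p with
  | nil => rfl
  | cons w t ih =>
    simp only [List.foldl]
    rw [pvWord_step]
    exact ih _

-- ===== VERDICT (by name: the statement is the Claim_ definition above) =====
theorem combine_letters_spec : Claim_equal_combine_letters := by
  intro text letters torus_lines torus_pos _ _
  unfold Spec_combine_letters combine_letters combine_letters_alt
  rw [show (List.replicate 6 "" : List String) = pvRenderF (fun _ => []) from rfl, pvFoldWords,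
    pvRange6]
  rfl
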